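-- pv_equiv track=rewrite | github.com/zmess24/udemy_mastering_the_coding_interview_faang | leetcode/strings/easy__generate_document/solution.py | generateDocument
-- ===== SOURCE A (Python) =====
-- def generateDocument(characters, document):
--     c = list(characters)
--     d = list(document)
--
--     for char in characters:
--         if char in d:
--             index = d.index(char)
--             d.pop(index)
--
--     return len(d) == 0
-- ===== SOURCE B (Python) =====
-- def generateDocument(characters, document):
--     avail = {}
--     for ch in characters:
--         avail[ch] = avail.get(ch, 0) + 1
--     for ch in document:
--         n = avail.get(ch, 0)
--         if n == 0:
--             return False
--         avail[ch] = n - 1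
--     return True
-- ===== Notes on version B (the rewrite author's own statement) =====
-- stated objective: faster
-- what changed: Replaces the per-character list membership/index/pop scans with a single frequency dictionary built once over characters and decremented in one pass over document, with early exit on a missing character.
import Mathlib
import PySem

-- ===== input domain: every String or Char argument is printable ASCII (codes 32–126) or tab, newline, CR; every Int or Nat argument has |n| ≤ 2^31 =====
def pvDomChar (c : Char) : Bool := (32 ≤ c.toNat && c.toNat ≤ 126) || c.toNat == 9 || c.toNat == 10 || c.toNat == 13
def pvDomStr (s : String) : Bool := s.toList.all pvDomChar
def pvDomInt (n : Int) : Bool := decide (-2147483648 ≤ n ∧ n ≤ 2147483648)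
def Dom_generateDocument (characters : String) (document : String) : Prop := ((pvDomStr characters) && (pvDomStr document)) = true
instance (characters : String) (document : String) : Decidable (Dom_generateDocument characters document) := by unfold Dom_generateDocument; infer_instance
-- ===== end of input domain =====

-- B replaces A's per-character list membership/index/pop scans with a frequency dictionary
-- built once over `characters` and decremented in one pass over `document` (faster).

-- ===== PORT A =====
-- one iteration of A's loop body: if char in d: d.pop(d.index(char))
def pvStepA (d : List Char) (ch : Char) : List Char :=
  if d.contains ch then
    match PySem.List.index? d ch with
    | some idx =>
      match PySem.List.pop? d (idx : Int) with
      | some (_, rest) => rest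
      | none => d
    | none => d
  else d

def generateDocument (characters : String) (document : String) : Bool :=
  let _c := characters.toList
  let d := document.toList
  let d := characters.toList.foldl pvStepA d
  d.length == 0

-- ===== PORT B =====
-- B's second loop: for ch in document: n = avail.get(ch, 0); if n == 0: return False; avail[ch] = n - 1
def pvCheckB (avail : PySem.Dict Char Int) : List Char → Bool
  | [] => true
  | ch :: rest =>
    let n := avail.getD ch 0
    if n == 0 then false
    else pvCheckB (avail.insert ch (n - 1)) rest

def generateDocument_alt (characters : String) (document : String) : Bool :=
  let avail := characters.toList.foldl (fun d ch => d.insert ch (d.getD ch 0 + 1)) PySem.Dict.empty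
  pvCheckB avail document.toList

-- ===== PRECONDITION & SPEC =====
def Spec_generateDocument (characters : String) (document : String) (out : Bool) : Prop := out = generateDocument_alt characters document
instance (characters : String) (document : String) (out : Bool) : Decidable (Spec_generateDocument characters document out) := by unfold Spec_generateDocument; infer_instance

-- ===== CLAIM (what is proved, stated in full; the proofs are below) =====
def Claim_equal_generateDocument : Prop := ∀ (characters : String) (document : String), Dom_generateDocument characters document → Spec_generateDocument characters document (generateDocument characters document)

-- ===== LEMMAS AND PROOFS =====

-- A's loop body removes the first occurrence of ch, i.e. List.erase
theorem pvStepA_eq_erase (d : List Char) (ch : Char) : pvStepA d ch = d.erase ch := by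
  unfold pvStepA
  by_cases h : ch ∈ d
  · simp only [List.contains_eq_mem, h, decide_true, if_true]
    rcases hk : PySem.List.index? d ch with _ | k
    · rw [PySem.List.index?_eq_none_iff] at hk; exact absurd h hk
    · obtain ⟨hlt, _, _⟩ := PySem.List.getElem_of_index?_eq_some hk
      rw [PySem.List.index?_eq_idxOf?] at hk
      have hkk : d.idxOf ch = k := by rw [List.idxOf_eq_getD_idxOf?, hk]; rfl
      simp only [PySem.List.pop?_natCast d k hlt]
      rw [List.erase_eq_eraseIdx_of_idxOf rfl, hkk]
  · simp [List.contains_eq_mem, h, List.erase_of_not_mem h]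

-- A returns true iff document's multiset is contained in characters'
theorem pvA_iff (c d : String) :
    generateDocument c d = true ↔ ∀ x : Char, d.toList.count x ≤ c.toList.count x := by
  simp only [generateDocument]
  have hfun : pvStepA = List.erase := funext fun d => funext fun ch => pvStepA_eq_erase d ch
  rw [hfun, ← List.diff_eq_foldl]
  simp only [beq_iff_eq, List.length_eq_zero_iff]
  rw [← Multiset.coe_eq_zero, ← Multiset.coe_sub, tsub_eq_zero_iff_le, Multiset.le_iff_count]
  simp [Multiset.coe_count]

-- B's check loop characterisation
theorem pvCheckB_iff (ds : List Char) (avail : PySem.Dict Char Int)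
    (hnn : ∀ x : Char, 0 ≤ avail.getD x 0) :
    pvCheckB avail ds = true ↔ ∀ x : Char, (ds.count x : Int) ≤ avail.getD x 0 := by
  induction ds generalizing avail with
  | nil => simpa [pvCheckB] using hnn
  | cons ch rest ih =>
    unfold pvCheckB
    by_cases h0 : avail.getD ch 0 = 0
    · simp only [h0, beq_self_eq_true, if_true]
      constructor
      · intro h; exact absurd h (by simp)
      · intro h
        have := h ch
        rw [List.count_cons_self, h0] at this
        push_cast at this
        omega
    · simp only [beq_iff_eq, h0, if_false]
      rw [ih _ (by
        intro x
        rw [PySem.Dict.getD_insert]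
        split_ifs with hx
        · have := hnn ch; omega
        · exact hnn x)]
      constructor
      · intro h x
        have := h x
        rw [PySem.Dict.getD_insert] at this
        by_cases hx : x = ch
        · subst hx
          rw [if_pos rfl] at this
          rw [List.count_cons_self]
          push_cast
          omega
        · rw [if_neg hx] at this
          rw [List.count_cons_of_ne (Ne.symm hx)]
          omega
      · intro h x
        have := h x
        rw [PySem.Dict.getD_insert]
        by_cases hx : x = ch
        · subst hx
          rw [if_pos rfl]
          rw [List.count_cons_self] at this
          push_cast at this
          omega
        · rw [if_neg hx]
          rw [List.count_cons_of_ne (Ne.symm hx)] at this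
          omega

theorem pvB_iff (c d : String) :
    generateDocument_alt c d = true ↔ ∀ x : Char, d.toList.count x ≤ c.toList.count x := by
  unfold generateDocument_alt
  rw [PySem.Dict.foldl_insert_getD_add_one_eq_counter]
  rw [pvCheckB_iff _ _ (by intro x; rw [PySem.Dict.getD_counter]; positivity)]
  simp only [PySem.Dict.getD_counter, Nat.cast_le]

-- ===== VERDICT (by name: the statement is the Claim_ definition above) =====
theorem generateDocument_spec : Claim_equal_generateDocument := by
  intro c d _
  unfold Spec_generateDocument
  rw [Bool.eq_iff_iff, pvA_iff, pvB_iff]
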